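-- pv_equiv track=rewrite | github.com/lcfyi/advent-of-code | day4/part2/sol.py | verify_number
-- ===== SOURCE A (Python) =====
-- from functools import reduce
--
-- def verify_monotonic(a, b):
--     if a == -1:
--         return -1
--     elif int(a) <= int(b):
--         return b
--     else:
--         return -1
--
-- def verify_number(num):
--     result = reduce(verify_monotonic, str(num))
--
--     if result == -1:
--         return False
--
--     counts = []
--     last = None
--     count = 0
--     for n in str(num):
--         if not last:
--             last = n
--             count = 1
--         elif n == last:
--             count += 1
--             last = n
--         else:
--             counts.append(count)
--             last = n
--             count = 1
--     counts.append(count)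
--
--     for count in counts:
--         if count == 2:
--             return True
--
--     return False
-- ===== SOURCE B (Python) =====
-- def verify_number(num):
--     s = str(num)
--     if any(a > b for a, b in zip(s, s[1:])):
--         return False
--     # digits are non-decreasing, so each distinct digit forms one contiguous
--     # run: a run of length 2 exists iff some digit occurs exactly twice.
--     counts = {}
--     for c in s:
--         counts[c] = counts.get(c, 0) + 1
--     return 2 in counts.values()
-- ===== Notes on version B (the rewrite author's own statement) =====
-- stated objective: simpler
-- what changed: The run-length state machine (last/count/counts list) is replaced by a digit-frequency map: since the digits are checked non-decreasing first (via a pairwise zip instead of a reduce), each distinct digit is one contiguous run, so 'some run has length 2' is exactly 'some digit occurs twice'.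
import Mathlib
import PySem

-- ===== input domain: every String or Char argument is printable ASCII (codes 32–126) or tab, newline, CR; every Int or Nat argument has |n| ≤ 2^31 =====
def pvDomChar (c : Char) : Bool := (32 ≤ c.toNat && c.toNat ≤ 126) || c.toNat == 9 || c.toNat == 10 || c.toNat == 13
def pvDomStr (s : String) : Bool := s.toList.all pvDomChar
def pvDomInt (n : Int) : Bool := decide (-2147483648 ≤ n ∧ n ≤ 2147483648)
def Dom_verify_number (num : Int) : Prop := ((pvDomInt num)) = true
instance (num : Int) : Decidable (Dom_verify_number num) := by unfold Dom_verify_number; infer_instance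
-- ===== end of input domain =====

-- B replaces A's run-length state machine by a pairwise monotonicity test plus a
-- digit-frequency map (simpler; same O(n) cost).

-- ===== PORT A =====
-- reduce state of verify_monotonic: 'some c' = the last accepted character, 'none' = -1.
-- On Pre_ (num ≥ 0) every character is a decimal digit, where int(a) <= int(b) is
-- exactly a.toNat ≤ b.toNat (code-point order agrees with numeric order on digits).
def pvVMStep (a : Option Char) (b : Char) : Option Char :=
  match a with
  | none => none
  | some c => if c.toNat ≤ b.toNat then some b else none

-- one iteration of A's run-length loop over (counts, last, count)
def pvCountStep (st : List Int × Option Char × Int) (n : Char) : List Int × Option Char × Int :=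
  match st with
  | (counts, none, _) => (counts, some n, 1)
  | (counts, some last, count) =>
    if n = last then (counts, some n, count + 1)
    else (counts ++ [count], some n, 1)

def verify_number (num : Int) : Bool :=
  let s := PySem.Int.toChars num                       -- str(num)
  let result : Option Char :=
    match s with
    | [] => none      -- unreachable: str(num) is never empty (Python's reduce would raise there)
    | h :: t => t.foldl pvVMStep (some h)              -- reduce(verify_monotonic, str(num))
  match result with
  | none => false
  | some _ =>
    let st := s.foldl pvCountStep ([], none, 0)
    let counts := st.1 ++ [st.2.2]                     -- counts.append(count)
    counts.any (fun c => c == 2)                       -- for count in counts: if count == 2 …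

-- ===== PORT B =====
def verify_number_alt (num : Int) : Bool :=
  let s := PySem.Int.toChars num                       -- str(num)
  if (s.zip s.tail).any (fun p => decide (p.2 < p.1)) then false   -- any(a > b for a, b in zip(s, s[1:]))
  else
    let counts := s.foldl (fun d c => d.insert c (d.getD c 0 + 1)) (PySem.Dict.empty : PySem.Dict Char Int)
    counts.values.contains 2                           -- 2 in counts.values()

-- ===== PRECONDITION & SPEC =====
-- A raises ValueError on every negative num (reduce reaches int('-')); Pre_ excludes exactly those.
def Pre_verify_number (num : Int) : Prop := 0 ≤ num
instance (num : Int) : Decidable (Pre_verify_number num) := by unfold Pre_verify_number; infer_instance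
def pvWitness_verify_number : Int := (122)

def Spec_verify_number (num : Int) (out : Bool) : Prop := out = verify_number_alt num
instance (num : Int) (out : Bool) : Decidable (Spec_verify_number num out) := by unfold Spec_verify_number; infer_instance

-- ===== CLAIM (what is proved, stated in full; the proofs are below) =====
def Claim_equal_verify_number : Prop := ∀ (num : Int), Dom_verify_number num → Pre_verify_number num → Spec_verify_number num (verify_number num)

-- ===== LEMMAS AND PROOFS =====

-- run lengths of t, given that a run of the value c with length k so far precedes it
def pvRL : Char → Int → List Char → List Int
  | _, k, [] => [k]
  | c, k, b :: t => if b = c then pvRL c (k + 1) t else k :: pvRL b 1 t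

lemma pvCharLt (a b : Char) : a < b ↔ a.toNat < b.toNat :=
  ⟨fun h => h, fun h => Char.lt_def.mpr h⟩

lemma pvCharToNatInj (a b : Char) (h : a.toNat = b.toNat) : a = b :=
  Char.eq_of_val_eq (UInt32.toNat_inj.mp h)

lemma pvCountConsNe (d b : Char) (t : List Char) (h : d ≠ b) :
    (b :: t).count d = t.count d := by
  rw [List.count_cons]
  simp [Ne.symm h]

lemma pvVM_absorb (t : List Char) : t.foldl pvVMStep none = none := by
  induction t with
  | nil => rfl
  | cons b t ih => simpa [pvVMStep] using ih

lemma pvVM_none_iff (t : List Char) (h : Char) :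
    (t.foldl pvVMStep (some h) = none) ↔
      (((h :: t).zip t).any (fun p => decide (p.2 < p.1)) = true) := by
  induction t generalizing h with
  | nil => simp
  | cons b t ih =>
    by_cases hc : h.toNat ≤ b.toNat
    · have hnb : ¬ (b < h) := by rw [pvCharLt]; omega
      simp [pvVMStep, hc, hnb, ih b]
    · have hb : b < h := by rw [pvCharLt]; omega
      simp [pvVMStep, hc, pvVM_absorb, hb]

lemma pvNoDesc_pairwise (s : List Char)
    (h : (s.zip s.tail).any (fun p => decide (p.2 < p.1)) = false) :
    List.Pairwise (fun a b : Char => a.toNat ≤ b.toNat) s := by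
  have hchain : List.IsChain (fun a b : Char => a.toNat ≤ b.toNat) s := by
    induction s with
    | nil => simp
    | cons a t ih =>
      cases t with
      | nil => simp
      | cons b t' =>
        simp only [List.tail_cons, List.zip_cons_cons, List.any_cons, Bool.or_eq_false_iff,
          decide_eq_false_iff_not] at h
        have hab : a.toNat ≤ b.toNat := by
          have := h.1; rw [pvCharLt] at this; omega
        exact (List.isChain_cons_cons).mpr ⟨hab, ih h.2⟩
  haveI : Trans (fun a b : Char => a.toNat ≤ b.toNat) (fun a b : Char => a.toNat ≤ b.toNat)
      (fun a b : Char => a.toNat ≤ b.toNat) := ⟨fun hab hbc => le_trans hab hbc⟩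
  exact List.isChain_iff_pairwise.mp hchain

lemma pvCountFold (t : List Char) (c : Char) (k : Int) (acc : List Int) :
    (t.foldl pvCountStep (acc, some c, k)).1 ++ [(t.foldl pvCountStep (acc, some c, k)).2.2]
      = acc ++ pvRL c k t := by
  induction t generalizing c k acc with
  | nil => simp [pvRL]
  | cons b t ih =>
    by_cases hb : b = c
    · subst hb
      simpa [pvCountStep, pvRL] using ih b (k + 1) acc
    · have := ih b 1 (acc ++ [k])
      simpa [pvCountStep, hb, pvRL] using this

lemma pvRL_mem_two (t : List Char) (c : Char) (k : Int)
    (hp : List.Pairwise (fun a b : Char => a.toNat ≤ b.toNat) (c :: t)) :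
    ((2 : Int) ∈ pvRL c k t) ↔
      (k + (t.count c : Int) = 2 ∨ ∃ d ∈ t, d ≠ c ∧ (t.count d : Int) = 2) := by
  induction t generalizing c k with
  | nil => simp [pvRL]; omega
  | cons b t ih =>
    have hcb : c.toNat ≤ b.toNat := (List.pairwise_cons.mp hp).1 b (by simp)
    have hp' : List.Pairwise (fun a b : Char => a.toNat ≤ b.toNat) (b :: t) :=
      (List.pairwise_cons.mp hp).2
    by_cases hb : b = c
    · subst hb
      rw [pvRL, if_pos rfl, ih b (k + 1) hp']
      constructor
      · rintro (hk | ⟨d, hd, hdc, hcnt⟩)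
        · left; simp [List.count_cons_self]; omega
        · right; exact ⟨d, by simp [hd], hdc, by rw [pvCountConsNe d b t hdc]; exact hcnt⟩
      · rintro (hk | ⟨d, hd, hdc, hcnt⟩)
        · left; simp [List.count_cons_self] at hk; omega
        · rcases List.mem_cons.mp hd with h1 | h1
          · exact absurd h1 hdc
          · right; exact ⟨d, h1, hdc, by rw [pvCountConsNe d b t hdc] at hcnt; exact hcnt⟩
    · -- b ≠ c and the list is sorted, so c occurs nowhere in b :: t
      have hcb' : c.toNat < b.toNat := by
        rcases Nat.lt_or_ge c.toNat b.toNat with h | h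
        · exact h
        · exact absurd (pvCharToNatInj c b (by omega)).symm hb
      have hct : ∀ d ∈ b :: t, c.toNat < d.toNat := by
        intro d hd
        rcases List.mem_cons.mp hd with h1 | h1
        · subst h1; exact hcb'
        · have := (List.pairwise_cons.mp hp').1 d h1; omega
      have hcnot : c ∉ b :: t := fun hmem => by
        have := hct c hmem; omega
      have hcount0 : (b :: t).count c = 0 := List.count_eq_zero.mpr hcnot
      rw [pvRL, if_neg hb, List.mem_cons, ih b 1 hp', hcount0]
      constructor
      · rintro (hk | hk | ⟨d, hd, hdb, hcnt⟩)
        · left; omega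
        · right
          exact ⟨b, by simp, hb, by rw [List.count_cons_self]; push_cast at hk ⊢; omega⟩
        · right
          have hdc : d ≠ c := fun h => by
            have := hct d (by simp [hd]); subst h; omega
          exact ⟨d, by simp [hd], hdc, by rw [pvCountConsNe d b t hdb]; exact hcnt⟩
      · rintro (hk | ⟨d, hd, hdc, hcnt⟩)
        · left; omega
        · rcases List.mem_cons.mp hd with h1 | h1
          · subst h1
            right; left
            rw [List.count_cons_self] at hcnt; push_cast at hcnt ⊢; omega
          · by_cases hdb : d = b
            · subst hdb
              right; left
              rw [List.count_cons_self] at hcnt; push_cast at hcnt ⊢; omega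
            · right; right
              exact ⟨d, h1, hdb, by rw [pvCountConsNe d b t hdb] at hcnt; exact hcnt⟩

lemma pvAltCounter (s : List Char) :
    ((s.foldl (fun d c => d.insert c (d.getD c 0 + 1)) (PySem.Dict.empty : PySem.Dict Char Int)).values.contains 2 = true)
      ↔ ∃ d ∈ s, ((s.count d : Nat) : Int) = 2 := by
  rw [PySem.Dict.foldl_insert_getD_add_one_eq_counter]
  have hv : (PySem.Dict.counter s).values
      = (PySem.Set.ofList s).map (fun k => ((s.count k : Nat) : Int)) := by
    have := PySem.Dict.items_counter s
    simp only [PySem.Dict.values, this, List.map_map]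
    rfl
  rw [hv]
  simp only [List.contains_iff_mem, List.mem_map]
  constructor
  · rintro ⟨d, hd, hcnt⟩
    exact ⟨d, (PySem.Set.mem_ofList s d).mp hd, hcnt⟩
  · rintro ⟨d, hd, hcnt⟩
    exact ⟨d, (PySem.Set.mem_ofList s d).mpr hd, hcnt⟩

lemma pvExistsBridge (h : Char) (t : List Char) :
    (1 + (t.count h : Int) = 2 ∨ ∃ d ∈ t, d ≠ h ∧ (t.count d : Int) = 2)
      ↔ ∃ d ∈ h :: t, (((h :: t).count d : Nat) : Int) = 2 := by
  constructor
  · rintro (hk | ⟨d, hd, hdh, hcnt⟩)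
    · exact ⟨h, by simp, by rw [List.count_cons_self]; push_cast at hk ⊢; omega⟩
    · exact ⟨d, by simp [hd], by rw [pvCountConsNe d h t hdh]; exact hcnt⟩
  · rintro ⟨d, hd, hcnt⟩
    rcases List.mem_cons.mp hd with h1 | h1
    · subst h1; left
      rw [List.count_cons_self] at hcnt; push_cast at hcnt ⊢; omega
    · by_cases hdh : d = h
      · subst hdh; left
        rw [List.count_cons_self] at hcnt; push_cast at hcnt ⊢; omega
      · right
        exact ⟨d, h1, hdh, by rw [pvCountConsNe d h t hdh] at hcnt; exact hcnt⟩

-- ===== VERDICT (by name: the statement is the Claim_ definition above) =====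
theorem verify_number_spec : Claim_equal_verify_number := by
  intro num _ hpre
  unfold Spec_verify_number
  -- str(num) is a nonempty list of characters
  have hne : PySem.Int.toChars num ≠ [] := by
    unfold PySem.Int.toChars
    unfold Pre_verify_number at hpre
    rw [if_neg (by omega : ¬ num < 0)]
    have : 0 < (Nat.toDigits 10 num.toNat).length := Nat.length_toDigits_pos
    intro h; rw [h] at this; simp at this
  obtain ⟨h, t, hs⟩ := List.exists_cons_of_ne_nil hne
  by_cases hdesc : (((h :: t).zip t).any (fun p => decide (p.2 < p.1)) = true)
  · -- a descent exists: A's reduce hits -1, B's any() fires; both return False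
    have hA : t.foldl pvVMStep (some h) = none := (pvVM_none_iff t h).mpr hdesc
    simp [verify_number, verify_number_alt, hs, hA, hdesc]
  · have hdesc' : ((h :: t).zip t).any (fun p => decide (p.2 < p.1)) = false :=
      Bool.eq_false_iff.mpr hdesc
    have hpair : List.Pairwise (fun a b : Char => a.toNat ≤ b.toNat) (h :: t) :=
      pvNoDesc_pairwise (h :: t) (by simpa using hdesc')
    obtain ⟨c0, hc0⟩ : ∃ c0, t.foldl pvVMStep (some h) = some c0 :=
      Option.ne_none_iff_exists'.mp (fun hn => hdesc ((pvVM_none_iff t h).mp hn))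
    have hfold : ((h :: t).foldl pvCountStep ([], none, 0)).1
        ++ [((h :: t).foldl pvCountStep ([], none, 0)).2.2] = pvRL h 1 t := by
      have : (h :: t).foldl pvCountStep ([], none, 0) = t.foldl pvCountStep ([], some h, 1) := by
        simp [pvCountStep]
      rw [this]
      simpa using pvCountFold t h 1 []
    simp only [verify_number, verify_number_alt, hs, hc0, List.tail_cons, hdesc',
      Bool.false_eq_true, if_false]
    rw [Bool.eq_iff_iff]
    rw [hfold]
    rw [pvAltCounter (h :: t)]
    rw [← pvExistsBridge h t, ← pvRL_mem_two t h 1 hpair]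
    simp
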